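-- pv_equiv track=rewrite | github.com/TeleTobyAU/Bachelor | python/SuffixArrayGenerator.py | findLMSSubstring
-- ===== SOURCE A (Python) =====
-- def findLMSSubstring(n, LMSIndexes):
--     LMSSubstringIndices = []
--     prev = -1
--     for i in range(len(n)):
--         if i in LMSIndexes:
--             if prev != -1:
--                 LMSSubstringIndices.append((prev, i))
--             prev = i
--
--     LMSSubStr = []
--     for i in LMSSubstringIndices:
--         LMSSubStr.append(n[i[0] : i[1] + 1])
--
--     return LMSSubStr
-- ===== SOURCE B (Python) =====
-- def findLMSSubstring(n, LMSIndexes):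
--     idx = sorted(set(x for x in LMSIndexes if 0 <= x < len(n)))
--     return [n[a:b + 1] for a, b in zip(idx, idx[1:])]
-- ===== Notes on version B (the rewrite author's own statement) =====
-- stated objective: simpler
-- what changed: Instead of scanning every position of n and testing membership in LMSIndexes, B filters LMSIndexes to in-range values, deduplicates with set(), sorts, and slices between consecutive zip pairs.
import Mathlib
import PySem

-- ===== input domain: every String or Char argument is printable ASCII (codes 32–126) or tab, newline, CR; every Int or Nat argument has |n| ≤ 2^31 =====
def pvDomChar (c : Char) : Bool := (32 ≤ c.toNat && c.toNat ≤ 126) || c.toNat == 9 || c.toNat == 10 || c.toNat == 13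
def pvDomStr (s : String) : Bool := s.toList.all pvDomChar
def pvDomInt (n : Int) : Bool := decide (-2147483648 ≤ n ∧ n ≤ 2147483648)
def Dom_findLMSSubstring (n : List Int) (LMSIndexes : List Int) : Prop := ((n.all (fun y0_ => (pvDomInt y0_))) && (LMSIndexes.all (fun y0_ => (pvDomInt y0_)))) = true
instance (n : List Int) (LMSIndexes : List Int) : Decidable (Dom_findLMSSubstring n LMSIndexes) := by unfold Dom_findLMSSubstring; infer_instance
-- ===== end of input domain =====

-- B (simpler, two lines): instead of scanning every position of n with a membership test,
-- it filters/dedups/sorts LMSIndexes itself and pairs consecutive entries with zip.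

-- ===== PORT A =====
def findLMSSubstring (n : List Int) (LMSIndexes : List Int) : List (List Int) :=
  let st := (PySem.List.pyRange 0 (PySem.List.len n) 1).foldl
    (fun (st : List (Int × Int) × Int) i =>
      if i ∈ LMSIndexes then
        (if st.2 ≠ -1 then st.1 ++ [(st.2, i)] else st.1, i)
      else st) ([], -1)
  st.1.foldl (fun acc p => acc ++ [PySem.List.slice n (some p.1) (some (p.2 + 1))]) []

-- ===== PORT B =====
def findLMSSubstring_alt (n : List Int) (LMSIndexes : List Int) : List (List Int) :=
  let idx := PySem.List.sorted
    (PySem.Set.ofList (LMSIndexes.filter (fun x => 0 ≤ x && x < PySem.List.len n)))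
    (fun x => x) false
  (idx.zip idx.tail).map (fun p => PySem.List.slice n (some p.1) (some (p.2 + 1)))

-- ===== PRECONDITION & SPEC =====
def Spec_findLMSSubstring (n : List Int) (LMSIndexes : List Int) (out : List (List Int)) : Prop := out = findLMSSubstring_alt n LMSIndexes
instance (n : List Int) (LMSIndexes : List Int) (out : List (List Int)) : Decidable (Spec_findLMSSubstring n LMSIndexes out) := by unfold Spec_findLMSSubstring; infer_instance

-- ===== CLAIM (what is proved, stated in full; the proofs are below) =====
def Claim_equal_findLMSSubstring : Prop := ∀ (n : List Int) (LMSIndexes : List Int), Dom_findLMSSubstring n LMSIndexes → Spec_findLMSSubstring n LMSIndexes (findLMSSubstring n LMSIndexes)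

-- ===== LEMMAS AND PROOFS =====

-- skipping fold: a fold that leaves the state unchanged off p is a fold over the filtered list
theorem foldl_skip {α β : Type} (p : α → Prop) [DecidablePred p]
    (g : β → α → β) (l : List α) (init : β) :
    l.foldl (fun st i => if p i then g st i else st) init
      = (l.filter (fun i => decide (p i))).foldl g init := by
  induction l generalizing init with
  | nil => rfl
  | cons x xs ih =>
      by_cases hx : p x <;> simp [hx, ih]

-- the pair-collecting fold over a list of nonnegative indices, started at a nonnegative prev,
-- appends the consecutive pairs of prev :: P
theorem foldl_pairs (P : List Int) (acc : List (Int × Int)) (prev : Int)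
    (hprev : 0 ≤ prev) (hP : ∀ x ∈ P, (0:Int) ≤ x) :
    (P.foldl (fun (st : List (Int × Int) × Int) i =>
        (if st.2 ≠ -1 then st.1 ++ [(st.2, i)] else st.1, i)) (acc, prev)).1
      = acc ++ (prev :: P).zip P := by
  induction P generalizing acc prev with
  | nil => simp
  | cons x xs ih =>
      have hne : prev ≠ -1 := by omega
      have hx : (0:Int) ≤ x := hP x (by simp)
      simp only [List.foldl_cons, hne, if_true, ne_eq, not_false_iff]
      rw [ih (acc ++ [(prev, x)]) x hx (fun y hy => hP y (by simp [hy]))]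
      simp [List.zip]

-- starting from prev = -1, the fold produces exactly the consecutive pairs of P
theorem foldl_pairs_start (P : List Int) (hP : ∀ x ∈ P, (0:Int) ≤ x) :
    (P.foldl (fun (st : List (Int × Int) × Int) i =>
        (if st.2 ≠ -1 then st.1 ++ [(st.2, i)] else st.1, i)) ([], -1)).1
      = P.zip P.tail := by
  cases P with
  | nil => simp
  | cons x xs =>
      have hx : (0:Int) ≤ x := hP x (by simp)
      simp only [List.foldl_cons, ne_eq, not_true_eq_false, reduceIte]
      rw [foldl_pairs xs [] x hx (fun y hy => hP y (by simp [hy]))]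
      simp

-- A's filtered range equals B's sorted deduplicated filtered index list
theorem idx_eq (n : List Int) (LMSIndexes : List Int) :
    ((PySem.List.pyRange 0 (PySem.List.len n) 1).filter
        (fun i => decide (i ∈ LMSIndexes)))
      = PySem.List.sorted
          (PySem.Set.ofList (LMSIndexes.filter (fun x => 0 ≤ x && x < PySem.List.len n)))
          (fun x => x) false := by
  apply Eq.symm
  apply PySem.List.sorted_eq_of_perm_of_pairwise_lt
  · -- permutation: both nodup with the same membership
    rw [List.perm_ext_iff_of_nodup
        ((PySem.List.nodup_pyRange_one 0 (PySem.List.len n)).filter _)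
        (PySem.Set.nodup_ofList _)]
    intro a
    simp [PySem.List.mem_pyRange_one, PySem.Set.mem_ofList, List.mem_filter]
    tauto
  · exact ((PySem.List.pairwise_lt_pyRange_one 0 (PySem.List.len n)).filter _)

-- ===== VERDICT (by name: the statement is the Claim_ definition above) =====
theorem findLMSSubstring_spec : Claim_equal_findLMSSubstring := by
  intro n LMSIndexes _
  show findLMSSubstring n LMSIndexes = findLMSSubstring_alt n LMSIndexes
  unfold findLMSSubstring findLMSSubstring_alt
  rw [PySem.List.foldl_append_singleton_eq_map]
  rw [foldl_skip (fun i => i ∈ LMSIndexes)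
      (fun (st : List (Int × Int) × Int) i =>
        (if st.2 ≠ -1 then st.1 ++ [(st.2, i)] else st.1, i))]
  rw [foldl_pairs_start _ (fun x hx => by
    have := List.of_mem_filter hx
    have hmem := List.mem_of_mem_filter hx
    exact ((PySem.List.mem_pyRange_one).1 hmem).1)]
  rw [idx_eq]
  simp
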